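-- pv_equiv track=rewrite | github.com/datashaman/code-skills | skills/audit-docs/scripts/scan_docs.py | has_go_doc_above
-- ===== SOURCE A (Python) =====
-- def has_go_doc_above(text: str, pos: int) -> bool:
--     head = text[:pos].rstrip().split("\n")
--     for line in reversed(head[-5:]):
--         if line.strip().startswith("//"):
--             return True
--         if line.strip() == "":
--             continue
--         return False
--     return False
-- ===== SOURCE B (Python) =====
-- def has_go_doc_above(text: str, pos: int) -> bool:
--     s = text[:pos].rstrip()
--     if s == "":
--         return False
--     last = s.rsplit("\n", 1)[-1]
--     return last.strip().startswith("//")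
-- ===== Notes on version B (the rewrite author's own statement) =====
-- stated objective: simpler
-- what changed: Replaces A's reversed blank-skipping loop over the last five lines of the rstripped prefix with a direct test of the single line after the last newline, which is always the line A's loop decides on since rstrip guarantees it is non-blank.
import Mathlib
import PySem

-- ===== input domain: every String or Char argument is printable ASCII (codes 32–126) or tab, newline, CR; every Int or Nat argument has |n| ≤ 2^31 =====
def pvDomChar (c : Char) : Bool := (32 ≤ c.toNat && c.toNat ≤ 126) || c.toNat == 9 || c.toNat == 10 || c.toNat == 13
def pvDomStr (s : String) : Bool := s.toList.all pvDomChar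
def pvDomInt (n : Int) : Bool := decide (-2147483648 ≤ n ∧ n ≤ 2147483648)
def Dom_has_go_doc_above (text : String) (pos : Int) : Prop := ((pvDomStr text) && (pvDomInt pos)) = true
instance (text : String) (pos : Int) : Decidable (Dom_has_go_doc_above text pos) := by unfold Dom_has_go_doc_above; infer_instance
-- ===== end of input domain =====

-- B replaces A's reversed blank-skipping loop over the last five lines by a direct test of the
-- last line of the rstripped prefix (objective: simpler).

-- ===== PORT A =====
-- the for-loop over reversed(head[-5:]) with its three branches, in order
def hgdaLoop : List (List Char) → Bool
  | [] => false
  | line :: rest =>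
    if PySem.Chars.startswith (PySem.Chars.strip line) ['/', '/'] then true
    else if PySem.Chars.strip line = [] then hgdaLoop rest
    else false

def has_go_doc_above (text : String) (pos : Int) : Bool :=
  let head := PySem.Chars.splitOn (PySem.Chars.rstrip (PySem.List.slice text.toList none (some pos))) ['\n']
  hgdaLoop (PySem.List.slice head (some (-5)) none).reverse

-- ===== PORT B =====
def has_go_doc_above_alt (text : String) (pos : Int) : Bool :=
  let s := PySem.Chars.rstrip (PySem.List.slice text.toList none (some pos))
  if s = [] then false
  else
    -- s.rsplit("\n", 1)[-1]: the segment after the last '\n' (exact hand port)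
    let last := (s.reverse.takeWhile (fun c => c ≠ '\n')).reverse
    PySem.Chars.startswith (PySem.Chars.strip last) ['/', '/']

-- ===== PRECONDITION & SPEC =====
def Spec_has_go_doc_above (text : String) (pos : Int) (out : Bool) : Prop := out = has_go_doc_above_alt text pos
instance (text : String) (pos : Int) (out : Bool) : Decidable (Spec_has_go_doc_above text pos out) := by unfold Spec_has_go_doc_above; infer_instance

-- ===== CLAIM (what is proved, stated in full; the proofs are below) =====
def Claim_equal_has_go_doc_above : Prop := ∀ (text : String) (pos : Int), Dom_has_go_doc_above text pos → Spec_has_go_doc_above text pos (has_go_doc_above text pos)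

-- ===== LEMMAS AND PROOFS =====

theorem tw_snoc (m : List Char) (c : Char) :
    List.takeWhile (fun x => decide (x ≠ '\n')) (m ++ [c]) =
      if '\n' ∈ m then List.takeWhile (fun x => decide (x ≠ '\n')) m
      else if c = '\n' then m else m ++ [c] := by
  induction m with
  | nil => by_cases hc : c = '\n' <;> simp [hc]
  | cons a m ih =>
    by_cases ha : a = '\n'
    · simp [ha]
    · rw [List.cons_append, List.takeWhile_cons_of_pos (by simp [ha]), ih]
      by_cases hm : '\n' ∈ m
      · simp [hm, List.takeWhile_cons_of_pos, ha]
      · by_cases hcn : c = '\n' <;> simp [hm, hcn, Ne.symm ha]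

theorem go_getLast? : ∀ (fuel : Nat) (l cur : List Char) (acc : List (List Char)),
    l.length ≤ fuel →
    (PySem.Chars.splitOn.go ['\n'] fuel l cur acc).getLast? =
      some (if '\n' ∈ l then (l.reverse.takeWhile (fun c => c ≠ '\n')).reverse else cur.reverse ++ l) := by
  intro fuel
  induction fuel with
  | zero =>
    intro l cur acc h
    have : l = [] := List.eq_nil_of_length_eq_zero (Nat.le_zero.mp h)
    subst this
    simp [PySem.Chars.splitOn.go]
  | succ n ih =>
    intro l cur acc h
    cases l with
    | nil => simp [PySem.Chars.splitOn.go]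
    | cons c rest =>
      simp only [List.length_cons, Nat.add_le_add_iff_right] at h
      by_cases hc : c = '\n'
      · subst hc
        rw [PySem.Chars.splitOn.go]
        simp only [List.isPrefixOf, beq_self_eq_true, Bool.and_self, if_pos,
          List.length_singleton, List.drop_succ_cons, List.drop_zero]
        rw [ih rest [] (cur.reverse :: acc) h]
        simp only [List.reverse_cons, tw_snoc, List.mem_reverse, List.mem_cons, true_or, if_true]
        split_ifs with hm <;> simp
      · rw [PySem.Chars.splitOn.go]
        have hpre : List.isPrefixOf ['\n'] (c :: rest) = false := by
          simp [List.isPrefixOf, Ne.symm hc]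
        simp only [hpre, Bool.false_eq_true, if_false]
        rw [ih rest (c :: cur) acc h]
        have hc' : ¬('\n' = c) := Ne.symm hc
        simp only [List.reverse_cons, tw_snoc, List.mem_reverse, List.mem_cons, hc', false_or]
        split_ifs with hm <;> simp

theorem head?_dropWhile {α : Type} (p : α → Bool) (l : List α) (x : α)
    (h : (List.dropWhile p l).head? = some x) : p x = false := by
  induction l with
  | nil => simp at h
  | cons a l ih =>
    by_cases hp : p a
    · rw [List.dropWhile_cons_of_pos hp] at h; exact ih h
    · rw [List.dropWhile_cons_of_neg hp] at h
      simp at h; subst h; simpa using hp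

theorem getLast?_splitOn (s : List Char) :
    (PySem.Chars.splitOn s ['\n']).getLast? = some ((s.reverse.takeWhile (fun c => c ≠ '\n')).reverse) := by
  rw [PySem.Chars.splitOn, go_getLast? (s.length + 1) s [] [] (by omega)]
  by_cases hm : '\n' ∈ s
  · simp [hm]
  · have : List.takeWhile (fun c => decide (c ≠ '\n')) s.reverse = s.reverse := by
      rw [List.takeWhile_eq_self_iff]
      intro a ha; simp only [List.mem_reverse] at ha
      simp; rintro rfl; exact hm ha
    rw [if_neg hm, this, List.reverse_reverse]
    simp

theorem rstrip_getLast_not_space (t : List Char) (x : Char)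
    (h : (PySem.Chars.rstrip t).getLast? = some x) : PySem.Chars.isspace x = false := by
  rw [PySem.Chars.rstrip, List.getLast?_reverse] at h
  exact head?_dropWhile _ _ _ h

theorem rstrip_of_last (m : List Char) (x : Char)
    (h : m.getLast? = some x) (hx : PySem.Chars.isspace x = false) :
    PySem.Chars.rstrip m = m := by
  rw [PySem.Chars.rstrip]
  have hh : m.reverse.head? = some x := by rwa [List.head?_reverse]
  cases hr : m.reverse with
  | nil => simp [hr] at hh
  | cons a r =>
    rw [hr] at hh; simp at hh; subst hh
    rw [List.dropWhile_cons_of_neg (by simp [hx]), ← hr, List.reverse_reverse]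

theorem strip_ne_nil (l : List Char) (x : Char)
    (h : l.getLast? = some x) (hx : PySem.Chars.isspace x = false) :
    PySem.Chars.strip l ≠ [] := by
  rw [PySem.Chars.strip, PySem.Chars.lstrip]
  have hne : List.dropWhile PySem.Chars.isspace l ≠ [] := by
    intro hnil
    rw [List.dropWhile_eq_nil_iff] at hnil
    have hxm : x ∈ l := List.mem_of_getLast? h
    have := hnil x hxm; simp [hx] at this
  have hlast : (List.dropWhile PySem.Chars.isspace l).getLast? = some x := by
    conv at h => rw [← List.takeWhile_append_dropWhile (p := PySem.Chars.isspace) (l := l)]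
    rw [List.getLast?_append] at h
    cases hq : (List.dropWhile PySem.Chars.isspace l).getLast? with
    | none => exact absurd (List.getLast?_eq_none_iff.mp hq) hne
    | some y => rw [hq] at h; simpa using h
  rw [rstrip_of_last _ _ hlast hx]
  exact hne

theorem key (t : List Char) :
    hgdaLoop (PySem.List.slice (PySem.Chars.splitOn (PySem.Chars.rstrip t) ['\n']) (some (-5)) none).reverse
      = (if PySem.Chars.rstrip t = [] then false else
          PySem.Chars.startswith
            (PySem.Chars.strip (((PySem.Chars.rstrip t).reverse.takeWhile (fun c => c ≠ '\n')).reverse))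
            ['/', '/']) := by
  by_cases hs : PySem.Chars.rstrip t = []
  · rw [hs, if_pos rfl]
    decide
  · rw [if_neg hs]
    set s := PySem.Chars.rstrip t with hsdef
    obtain ⟨x, hx⟩ : ∃ x, s.getLast? = some x := by
      cases hq : s.getLast? with
      | none => exact absurd (List.getLast?_eq_none_iff.mp hq) hs
      | some y => exact ⟨y, rfl⟩
    have hxs : PySem.Chars.isspace x = false := rstrip_getLast_not_space t x (hsdef ▸ hx)
    have hxn : x ≠ '\n' := by rintro rfl; exact absurd hxs (by decide)
    set L := (s.reverse.takeWhile (fun c => c ≠ '\n')).reverse with hLdef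
    have hL : (PySem.Chars.splitOn s ['\n']).getLast? = some L := getLast?_splitOn s
    set head := PySem.Chars.splitOn s ['\n'] with hheaddef
    have hheadne : head ≠ [] := by
      intro hnil; rw [hnil] at hL; simp at hL
    rw [PySem.List.slice_from_neg_ofNat head 5 (by omega)]
    set d := head.drop (head.length - 5) with hddef
    have hdne : d ≠ [] := by
      rw [hddef, ← List.length_pos_iff, List.length_drop]
      have := List.length_pos_iff.mpr hheadne
      omega
    have hdlast : d.getLast? = some L := by
      have : head = head.take (head.length - 5) ++ d := (List.take_append_drop _ _).symm
      rw [this, List.getLast?_append] at hL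
      cases hq : d.getLast? with
      | none => exact absurd (List.getLast?_eq_none_iff.mp hq) hdne
      | some y => rw [hq] at hL; simpa using hL
    obtain ⟨tail, htail⟩ : ∃ tail, d.reverse = L :: tail := by
      have hh : d.reverse.head? = some L := by rwa [← List.getLast?_eq_head?_reverse]
      cases hr : d.reverse with
      | nil => rw [hr] at hh; simp at hh
      | cons a r => rw [hr] at hh; simp at hh; exact ⟨r, by rw [hh]⟩
    have hLlast : L.getLast? = some x := by
      rw [hLdef, List.getLast?_eq_head?_reverse, List.reverse_reverse]
      have hsr : s.reverse.head? = some x := by rwa [← List.getLast?_eq_head?_reverse]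
      cases hr : s.reverse with
      | nil => rw [hr] at hsr; simp at hsr
      | cons a r =>
        rw [hr] at hsr; simp at hsr; subst hsr
        rw [List.takeWhile_cons_of_pos (by simp [hxn])]
        simp
    have hstrip : PySem.Chars.strip L ≠ [] := strip_ne_nil L x hLlast hxs
    rw [htail, hgdaLoop]
    split_ifs with hp
    · simp [hp]
    · simp [hp]

-- ===== VERDICT (by name: the statement is the Claim_ definition above) =====
theorem has_go_doc_above_spec : Claim_equal_has_go_doc_above := by
  intro text pos _
  unfold Spec_has_go_doc_above has_go_doc_above has_go_doc_above_alt
  exact key (PySem.List.slice text.toList none (some pos))
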